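-- pv_equiv track=rewrite | github.com/klterwelp/CPBS7712_day3 | src/alignment.py | prioritize_seeds_by_diagonal
-- ===== SOURCE A (Python) =====
-- def prioritize_seeds_by_diagonal(seeds):
--     """
--     Filter seeds to only those with the most common diagonal value.
--     Diagonal is defined by the difference between read position - contig position.
--     For example, if you compared "ATCG" to "ATCG", the top 2-mer seeds would be:
--     (0, 0), (1, 1), (2, 2), (3, 3) which all have a diagonal of 0.
--     Returns the filtered list of seeds with the most common diagonal.
--     """
--     # Create a dictionary to store the diagonals and their corresponding counts
--     diagonal_counts = {}
--     for seed in seeds: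
--         q_pos, r_pos = seed
--         diagonal = r_pos - q_pos
--         if diagonal not in diagonal_counts:
--             diagonal_counts[diagonal] = 0
--         diagonal_counts[diagonal] += 1
--
--     # Find the diagonal with the most seeds
--     max_count = max(diagonal_counts.values())
--     if max_count == 1:
--         # this means that all diagonals are unique,
--         # which may mean that the seeds are one-off hits
--         return None
--     max_diagonal = max(diagonal_counts, key=diagonal_counts.get)
--
--     # Filter seeds to only those with the most common diagonal
--     filtered_seeds = [seed for seed in seeds if (seed[1] - seed[0]) == max_diagonal]
--
--     # return the first seed of the most common diagonal
--     return filtered_seeds[0]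
-- ===== SOURCE B (Python) =====
-- def prioritize_seeds_by_diagonal(seeds):
--     # One pass: per diagonal keep (running count, first seed seen on it);
--     # then pick the earliest-inserted diagonal with the maximal count.
--     table = {}
--     for seed in seeds:
--         q_pos, r_pos = seed
--         diag = r_pos - q_pos
--         if diag in table:
--             count, first = table[diag]
--             table[diag] = (count + 1, first)
--         else:
--             table[diag] = (1, seed)
--     max_count = max(count for count, _ in table.values())
--     if max_count == 1:
--         return None
--     for count, first in table.values():
--         if count == max_count:
--             return first
-- ===== Notes on version B (the rewrite author's own statement) =====
-- stated objective: simpler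
-- what changed: B builds a single dict mapping each diagonal to (running count, first seed seen on it) in one pass and then just scans the dict values for the first maximal count, eliminating A's max-by-lookup over the keys and A's second filtering pass over seeds.
-- outside the precondition, e.g. on prioritize_seeds_by_diagonal([]): A raises ValueError, B raises ValueError
import Mathlib
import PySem

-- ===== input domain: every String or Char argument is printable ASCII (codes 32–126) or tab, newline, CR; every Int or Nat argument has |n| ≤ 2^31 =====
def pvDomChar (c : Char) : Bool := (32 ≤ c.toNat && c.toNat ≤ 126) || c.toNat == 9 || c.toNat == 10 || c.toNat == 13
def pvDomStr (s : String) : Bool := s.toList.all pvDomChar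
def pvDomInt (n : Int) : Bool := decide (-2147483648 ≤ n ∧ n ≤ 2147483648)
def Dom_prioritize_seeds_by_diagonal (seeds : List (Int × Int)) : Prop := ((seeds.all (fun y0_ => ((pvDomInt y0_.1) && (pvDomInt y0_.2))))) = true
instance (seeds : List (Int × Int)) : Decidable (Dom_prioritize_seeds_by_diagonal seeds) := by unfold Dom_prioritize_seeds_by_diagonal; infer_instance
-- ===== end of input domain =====

-- B builds one table mapping each diagonal to (running count, first seed on it) in a single pass,
-- replacing A's max-by-lookup over the keys and its second filtering scan of seeds; objective: simpler.

-- ===== PORT A =====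
-- A-side helper: the body of A's counting loop (if diagonal not in dict: dict[diagonal] = 0; dict[diagonal] += 1)
def pvStepA (d : PySem.Dict Int Int) (seed : Int × Int) : PySem.Dict Int Int :=
  let diagonal := seed.2 - seed.1
  let d1 := if d.contains diagonal = false then d.insert diagonal 0 else d
  d1.modify diagonal 0 (· + 1)

def prioritize_seeds_by_diagonal (seeds : List (Int × Int)) : Option (Int × Int) :=
  let diagonal_counts := seeds.foldl pvStepA PySem.Dict.empty
  match PySem.List.max? diagonal_counts.values (fun v => v) with
  | none => none            -- max() of an empty dict raises ValueError: excluded by Pre_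
  | some max_count =>
    if max_count == 1 then none
    else
      match PySem.List.max? diagonal_counts.keys (fun k => diagonal_counts.getD k 0) with
      | none => none        -- unreachable (the dict is nonempty here)
      | some max_diagonal =>
        let filtered_seeds := seeds.filter (fun seed => seed.2 - seed.1 == max_diagonal)
        PySem.List.pyGet? filtered_seeds 0   -- filtered_seeds[0] (none = IndexError, unreachable)

-- ===== PORT B =====
-- B-side helper: the body of B's single bookkeeping loop
def pvStepB (t : PySem.Dict Int (Int × (Int × Int))) (seed : Int × Int) : PySem.Dict Int (Int × (Int × Int)) :=
  let diag := seed.2 - seed.1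
  match t.get? diag with
  | some (count, first) => t.insert diag (count + 1, first)
  | none => t.insert diag (1, seed)

def prioritize_seeds_by_diagonal_alt (seeds : List (Int × Int)) : Option (Int × Int) :=
  let table := seeds.foldl pvStepB PySem.Dict.empty
  match PySem.List.max? (table.values.map (fun cv => cv.1)) (fun v => v) with
  | none => none            -- max() of an empty generator raises ValueError: excluded by Pre_
  | some max_count =>
    if max_count == 1 then none
    else
      match table.values.find? (fun cv => cv.1 == max_count) with
      | some cv => some cv.2
      | none => none        -- unreachable (some count equals the maximum)

-- ===== PRECONDITION & SPEC =====
-- Pre_ excludes only the empty list, on which A raises ValueError (max() of an empty sequence).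
def Pre_prioritize_seeds_by_diagonal (seeds : List (Int × Int)) : Prop := seeds ≠ []
instance (seeds : List (Int × Int)) : Decidable (Pre_prioritize_seeds_by_diagonal seeds) := by unfold Pre_prioritize_seeds_by_diagonal; infer_instance
def pvWitness_prioritize_seeds_by_diagonal : (List (Int × Int)) := [(0, 0), (1, 1), (2, 5)]
def Spec_prioritize_seeds_by_diagonal (seeds : List (Int × Int)) (out : Option (Int × Int)) : Prop := out = prioritize_seeds_by_diagonal_alt seeds
instance (seeds : List (Int × Int)) (out : Option (Int × Int)) : Decidable (Spec_prioritize_seeds_by_diagonal seeds out) := by unfold Spec_prioritize_seeds_by_diagonal; infer_instance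

-- ===== CLAIM (what is proved, stated in full; the proofs are below) =====
def Claim_equal_prioritize_seeds_by_diagonal : Prop := ∀ (seeds : List (Int × Int)), Dom_prioritize_seeds_by_diagonal seeds → Pre_prioritize_seeds_by_diagonal seeds → Spec_prioritize_seeds_by_diagonal seeds (prioritize_seeds_by_diagonal seeds)

-- ===== LEMMAS AND PROOFS =====

-- the projection relating B's table entries to A's dict entries
def pvProj (e : Int × (Int × (Int × Int))) : Int × Int := (e.1, e.2.1)

-- the loop invariant relating the two folds over the processed prefix p
def pvRel (p : List (Int × Int)) (da : PySem.Dict Int Int) (db : PySem.Dict Int (Int × (Int × Int))) : Prop :=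
  da.items = db.items.map pvProj ∧
  da.keys.Nodup ∧ db.keys.Nodup ∧
  (∀ d c f, db.get? d = some (c, f) → (p.filter (fun s => s.2 - s.1 == d)).head? = some f) ∧
  (∀ x ∈ p, db.contains (x.2 - x.1) = true)

lemma pvRel_init : pvRel [] PySem.Dict.empty PySem.Dict.empty := by
  refine ⟨rfl, by simp [PySem.Dict.keys, PySem.Dict.empty], by simp [PySem.Dict.keys, PySem.Dict.empty], ?_, by simp⟩
  intro d c f hget
  simp [PySem.Dict.get?_empty] at hget

lemma pvRel_step (p : List (Int × Int)) (da : PySem.Dict Int Int)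
    (db : PySem.Dict Int (Int × (Int × Int))) (s : Int × Int) (h : pvRel p da db) :
    pvRel (p ++ [s]) (pvStepA da s) (pvStepB db s) := by
  obtain ⟨h1, hna, hnb, h2, h4⟩ := h
  have hkeys : da.keys = db.keys := by
    simp only [PySem.Dict.keys, h1, List.map_map]; rfl
  cases hc : db.get? (s.2 - s.1) with
  | none =>
    have hnc : db.contains (s.2 - s.1) = false := by
      rw [PySem.Dict.contains_eq_isSome_get?, hc]; rfl
    have hmemk : (s.2 - s.1) ∉ db.keys := (PySem.Dict.get?_eq_none_iff_not_mem_keys db _).mp hc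
    have hnca : da.contains (s.2 - s.1) = false := by
      rw [← Bool.not_eq_true, PySem.Dict.contains_iff_mem_keys, hkeys]; exact hmemk
    have hstepA : pvStepA da s = da.insert (s.2 - s.1) 1 := by
      simp [pvStepA, hnca, PySem.Dict.modify, PySem.Dict.getD_insert_self,
        PySem.Dict.insert_insert_self]
    have hstepB : pvStepB db s = db.insert (s.2 - s.1) (1, s) := by
      simp [pvStepB, hc]
    rw [hstepA, hstepB]
    refine ⟨?_, PySem.Dict.nodup_keys_insert _ _ _ hna, PySem.Dict.nodup_keys_insert _ _ _ hnb, ?_, ?_⟩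
    · rw [PySem.Dict.items_insert_of_not_contains da _ hnca,
        PySem.Dict.items_insert_of_not_contains db _ hnc, h1, List.map_append]
      rfl
    · intro d c f hget
      rw [PySem.Dict.get?_insert] at hget
      by_cases hd : d = s.2 - s.1
      · subst hd
        rw [if_pos rfl] at hget
        obtain ⟨hc1, hf⟩ : (1 : Int) = c ∧ s = f := by simpa using hget
        have hfp : p.filter (fun x => x.2 - x.1 == s.2 - s.1) = [] := by
          rw [List.filter_eq_nil_iff]
          intro x hx hbx
          have hxe : x.2 - x.1 = s.2 - s.1 := by simpa using hbx
          have hx4 := h4 x hx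
          rw [hxe, hnc] at hx4
          simp at hx4
        rw [List.filter_append, hfp, List.nil_append]
        simp [← hf]
      · rw [if_neg hd] at hget
        have := h2 d c f hget
        rw [List.filter_append]
        have hfs : [s].filter (fun x => x.2 - x.1 == d) = [] := by
          simp [Ne.symm hd]
        rw [hfs, List.append_nil]
        exact this
    · intro x hx
      rw [List.mem_append] at hx
      rw [PySem.Dict.contains_insert]
      rcases hx with hx | hx
      · rw [h4 x hx]; simp
      · simp at hx; subst hx; simp
  | some cf =>
    obtain ⟨c, f⟩ := cf
    have hcc : db.contains (s.2 - s.1) = true := by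
      rw [PySem.Dict.contains_eq_isSome_get?, hc]; rfl
    have hmem : (s.2 - s.1, (c, f)) ∈ db.items := PySem.Dict.mem_items_of_get?_eq_some db hc
    have hmemA : (s.2 - s.1, c) ∈ da.items := by
      rw [h1]
      exact List.mem_map.mpr ⟨(s.2 - s.1, (c, f)), hmem, rfl⟩
    have hgda : da.getD (s.2 - s.1) 0 = c := PySem.Dict.getD_of_mem_items da hmemA hna 0
    have hcca : da.contains (s.2 - s.1) = true := by
      rw [PySem.Dict.contains_iff_mem_keys, hkeys, ← PySem.Dict.contains_iff_mem_keys]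
      exact hcc
    have hstepA : pvStepA da s = da.insert (s.2 - s.1) (c + 1) := by
      simp [pvStepA, hcca, PySem.Dict.modify, hgda]
    have hstepB : pvStepB db s = db.insert (s.2 - s.1) (c + 1, f) := by
      simp [pvStepB, hc]
    rw [hstepA, hstepB]
    refine ⟨?_, PySem.Dict.nodup_keys_insert _ _ _ hna, PySem.Dict.nodup_keys_insert _ _ _ hnb, ?_, ?_⟩
    · rw [PySem.Dict.items_insert_of_contains da _ hcca,
        PySem.Dict.items_insert_of_contains db _ hcc, h1, List.map_map, List.map_map]
      apply List.map_congr_left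
      intro e _
      by_cases he : e.1 = s.2 - s.1 <;> simp [pvProj, he]
    · intro d c' f' hget
      rw [PySem.Dict.get?_insert] at hget
      by_cases hd : d = s.2 - s.1
      · subst hd
        rw [if_pos rfl] at hget
        obtain ⟨hc1, hf⟩ : c + 1 = c' ∧ f = f' := by simpa using hget
        have hold := h2 (s.2 - s.1) c f hc
        rw [List.filter_append]
        cases hfp : p.filter (fun x => x.2 - x.1 == s.2 - s.1) with
        | nil => rw [hfp] at hold; simp at hold
        | cons y t =>
          rw [hfp] at hold
          simp only [List.head?_cons, Option.some.injEq] at hold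
          simp only [List.cons_append, List.head?_cons]
          rw [hold, hf]
      · rw [if_neg hd] at hget
        have := h2 d c' f' hget
        rw [List.filter_append]
        have hfs : [s].filter (fun x => x.2 - x.1 == d) = [] := by
          simp [Ne.symm hd]
        rw [hfs, List.append_nil]
        exact this
    · intro x hx
      rw [List.mem_append] at hx
      rw [PySem.Dict.contains_insert]
      rcases hx with hx | hx
      · rw [h4 x hx]; simp
      · simp at hx; subst hx; simp

lemma pvRel_fold (l : List (Int × Int)) :
    ∀ (p : List (Int × Int)) (da : PySem.Dict Int Int) (db : PySem.Dict Int (Int × (Int × Int))),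
      pvRel p da db → pvRel (p ++ l) (l.foldl pvStepA da) (l.foldl pvStepB db) := by
  induction l with
  | nil => intro p da db h; simpa using h
  | cons s t ih =>
    intro p da db h
    have := ih (p ++ [s]) (pvStepA da s) (pvStepB db s) (pvRel_step p da db s h)
    simpa [List.append_assoc] using this

-- ---- generic lemmas about PySem.List.max? (a left fold keeping the FIRST extremal element) ----

def pvMaxStep {α : Type} (key : α → Int) : Option α → α → Option α :=
  fun acc x =>
    match acc with
    | none => some x
    | some m => if key m < key x then some x else some m

lemma pv_max?_eq_foldl {α : Type} (key : α → Int) (l : List α) :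
    PySem.List.max? l key = List.foldl (pvMaxStep key) none l := rfl

lemma pv_foldl_max_map {α β : Type} (f : α → β) (key : β → Int) (l : List α) (acc : Option α) :
    List.foldl (pvMaxStep key) (acc.map f) (l.map f)
      = (List.foldl (pvMaxStep (fun x => key (f x))) acc l).map f := by
  induction l generalizing acc with
  | nil => rfl
  | cons x t ih =>
    cases acc with
    | none =>
      simp only [List.map_cons, List.foldl_cons, Option.map_none]
      have := ih (some x)
      simpa [pvMaxStep] using this
    | some m =>
      simp only [List.map_cons, List.foldl_cons, Option.map_some]
      by_cases h : key (f m) < key (f x)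
      · have := ih (some x)
        simpa [pvMaxStep, h] using this
      · have := ih (some m)
        simpa [pvMaxStep, h] using this

lemma pv_max?_map {α β : Type} (f : α → β) (key : β → Int) (l : List α) :
    PySem.List.max? (l.map f) key = (PySem.List.max? l (fun x => key (f x))).map f := by
  rw [pv_max?_eq_foldl, pv_max?_eq_foldl]
  simpa using pv_foldl_max_map f key l none

lemma pv_foldl_max_congr {α : Type} (k1 k2 : α → Int) (l : List α) :
    ∀ (acc : Option α), (∀ x ∈ l, k1 x = k2 x) → (∀ x, acc = some x → k1 x = k2 x) →
      List.foldl (pvMaxStep k1) acc l = List.foldl (pvMaxStep k2) acc l := by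
  induction l with
  | nil => intro acc _ _; rfl
  | cons x t ih =>
    intro acc hl ha
    have hx : k1 x = k2 x := hl x (by simp)
    cases acc with
    | none =>
      simp only [List.foldl_cons]
      exact ih (some x) (fun y hy => hl y (by simp [hy])) (by intro y hy; cases hy; exact hx)
    | some m =>
      have hm : k1 m = k2 m := ha m rfl
      simp only [List.foldl_cons, pvMaxStep, hm, hx]
      split
      · exact ih (some x) (fun y hy => hl y (by simp [hy])) (by intro y hy; cases hy; exact hx)
      · exact ih (some m) (fun y hy => hl y (by simp [hy])) (by intro y hy; cases hy; exact hm)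

lemma pv_max?_congr {α : Type} (k1 k2 : α → Int) (l : List α) (h : ∀ x ∈ l, k1 x = k2 x) :
    PySem.List.max? l k1 = PySem.List.max? l k2 := by
  rw [pv_max?_eq_foldl, pv_max?_eq_foldl]
  exact pv_foldl_max_congr k1 k2 l none h (by intro x hx; cases hx)

lemma pv_foldl_max_le {α : Type} (key : α → Int) (t : List α) :
    ∀ (a m : α), List.foldl (pvMaxStep key) (some a) t = some m →
      key a ≤ key m ∧ ∀ y ∈ t, key y ≤ key m := by
  induction t with
  | nil =>
    intro a m h
    simp only [List.foldl_nil, Option.some.injEq] at h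
    subst h
    exact ⟨le_refl _, by simp⟩
  | cons y t' ih =>
    intro a m h
    simp only [List.foldl_cons, pvMaxStep] at h
    by_cases hlt : key a < key y
    · rw [if_pos hlt] at h
      obtain ⟨h1, h2⟩ := ih y m h
      exact ⟨le_of_lt (lt_of_lt_of_le hlt h1), by
        intro z hz
        rcases List.mem_cons.mp hz with hz | hz
        · subst hz; exact h1
        · exact h2 z hz⟩
    · rw [if_neg hlt] at h
      obtain ⟨h1, h2⟩ := ih a m h
      exact ⟨h1, by
        intro z hz
        rcases List.mem_cons.mp hz with hz | hz
        · subst hz; exact le_trans (le_of_not_gt hlt) h1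
        · exact h2 z hz⟩

lemma pv_foldl_max_cases {α : Type} (key : α → Int) (t : List α) :
    ∀ (a m : α), List.foldl (pvMaxStep key) (some a) t = some m →
      m = a ∨ (m ∈ t ∧ key a < key m) := by
  induction t with
  | nil =>
    intro a m h
    simp only [List.foldl_nil, Option.some.injEq] at h
    exact Or.inl h.symm
  | cons y t' ih =>
    intro a m h
    simp only [List.foldl_cons, pvMaxStep] at h
    by_cases hlt : key a < key y
    · rw [if_pos hlt] at h
      rcases ih y m h with hm | ⟨hm, hlt'⟩
      · subst hm; exact Or.inr ⟨by simp, hlt⟩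
      · exact Or.inr ⟨by simp [hm], lt_trans hlt hlt'⟩
    · rw [if_neg hlt] at h
      rcases ih a m h with hm | ⟨hm, hlt'⟩
      · exact Or.inl hm
      · exact Or.inr ⟨by simp [hm], hlt'⟩

lemma pv_foldl_max_find {α : Type} (key : α → Int) (t : List α) :
    ∀ (a m : α), List.foldl (pvMaxStep key) (some a) t = some m →
      (a :: t).find? (fun x => key x == key m) = some m := by
  induction t with
  | nil =>
    intro a m h
    simp only [List.foldl_nil, Option.some.injEq] at h
    subst h
    simp [List.find?]
  | cons y t' ih =>
    intro a m h
    simp only [List.foldl_cons, pvMaxStep] at h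
    by_cases hlt : key a < key y
    · rw [if_pos hlt] at h
      have hfind := ih y m h
      have ham : key a < key m := by
        rcases pv_foldl_max_cases key t' y m h with hm | ⟨_, hlt'⟩
        · subst hm; exact hlt
        · exact lt_trans hlt hlt'
      rw [List.find?_cons_of_neg (by simp [ne_of_lt ham])]
      exact hfind
    · rw [if_neg hlt] at h
      have hfind := ih a m h
      by_cases heq : key a = key m
      · have hm : m = a := by
          rw [List.find?_cons_of_pos (by simp [heq])] at hfind
          simpa using hfind.symm
        subst hm
        rw [List.find?_cons_of_pos (by simp)]
      · rw [List.find?_cons_of_neg (by simp [heq])] at hfind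
        have ham : key a < key m :=
          lt_of_le_of_ne (pv_foldl_max_le key t' a m h).1 heq
        have hym : key y < key m := lt_of_le_of_lt (le_of_not_gt hlt) ham
        rw [List.find?_cons_of_neg (by simp [heq]), List.find?_cons_of_neg (by simp [ne_of_lt hym])]
        exact hfind

lemma pv_find?_max {α : Type} (key : α → Int) (l : List α) (m : α)
    (h : PySem.List.max? l key = some m) :
    l.find? (fun x => key x == key m) = some m := by
  cases l with
  | nil => rw [pv_max?_eq_foldl] at h; simp at h
  | cons a t =>
    rw [pv_max?_eq_foldl, List.foldl_cons] at h
    exact pv_foldl_max_find key t a m h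

-- ===== VERDICT (by name: the statement is the Claim_ definition above) =====
theorem prioritize_seeds_by_diagonal_spec : Claim_equal_prioritize_seeds_by_diagonal := by
  intro seeds _ hpre
  unfold Spec_prioritize_seeds_by_diagonal
  show prioritize_seeds_by_diagonal seeds = prioritize_seeds_by_diagonal_alt seeds
  set da := seeds.foldl pvStepA PySem.Dict.empty with hda
  set db := seeds.foldl pvStepB PySem.Dict.empty with hdb
  obtain ⟨h1, hna, hnb, h2, h4⟩ : pvRel seeds da db := by
    simpa using pvRel_fold seeds [] PySem.Dict.empty PySem.Dict.empty pvRel_init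
  -- the counts and keys of A's dict, read off B's table
  have hAvals : da.values = db.items.map (fun e => e.2.1) := by
    simp only [PySem.Dict.values, h1, List.map_map]; rfl
  have hBvals : db.values.map (fun cv => cv.1) = db.items.map (fun e => e.2.1) := by
    simp only [PySem.Dict.values, List.map_map]; rfl
  have hkeysA : da.keys = db.items.map (fun e => e.1) := by
    simp only [PySem.Dict.keys, h1, List.map_map]; rfl
  -- B's table is nonempty because seeds is
  have hne : db.items ≠ [] := by
    cases seeds with
    | nil => exact absurd rfl hpre
    | cons s0 rest =>
      intro hnil
      have hmem := (PySem.Dict.contains_iff_mem_keys db (s0.2 - s0.1)).mp (h4 s0 (by simp))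
      rw [PySem.Dict.keys, hnil] at hmem
      simp at hmem
  have hAm1 : PySem.List.max? (db.items.map (fun e => e.2.1)) (fun v => v)
      = (PySem.List.max? db.items (fun e => e.2.1)).map (fun e => e.2.1) :=
    pv_max?_map _ _ _
  cases hmax : PySem.List.max? db.items (fun e => e.2.1) with
  | none => exact absurd ((PySem.List.max?_eq_none_iff _ _).mp hmax) hne
  | some m =>
    have hAc : PySem.List.max? da.values (fun v => v) = some m.2.1 := by
      rw [hAvals, hAm1, hmax]; rfl
    have hBc : PySem.List.max? (db.values.map (fun cv => cv.1)) (fun v => v) = some m.2.1 := by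
      rw [hBvals, hAm1, hmax]; rfl
    have hmemm : m ∈ db.items := PySem.List.max?_mem hmax
    -- A's max-by-lookup over keys picks the diagonal of the same table entry
    have hKm1 : PySem.List.max? (db.items.map (fun e => e.1)) (fun k => da.getD k 0)
        = (PySem.List.max? db.items (fun e => da.getD e.1 0)).map (fun e => e.1) :=
      pv_max?_map _ _ _
    have hcongr : PySem.List.max? db.items (fun e => da.getD e.1 0)
        = PySem.List.max? db.items (fun e => e.2.1) := by
      refine pv_max?_congr _ _ _ (fun e he => ?_)
      have hmemA : (e.1, e.2.1) ∈ da.items := by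
        rw [h1]; exact List.mem_map.mpr ⟨e, he, rfl⟩
      exact PySem.Dict.getD_of_mem_items da hmemA hna 0
    have hAk : PySem.List.max? da.keys (fun k => da.getD k 0) = some m.1 := by
      rw [hkeysA, hKm1, hcongr, hmax]; rfl
    -- B's scan of the values finds exactly the entry A's max-by-lookup picked
    have hBf : db.values.find? (fun cv => cv.1 == m.2.1) = some m.2 := by
      have hfm : db.values.find? (fun cv => cv.1 == m.2.1)
          = (db.items.find? (fun e => e.2.1 == m.2.1)).map (fun e => e.2) := by
        simp only [PySem.Dict.values]
        rw [List.find?_map]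
        rfl
      have hfd : db.items.find? (fun e => e.2.1 == m.2.1) = some m := by
        simpa using pv_find?_max (fun e => e.2.1) db.items m hmax
      rw [hfm, hfd]; rfl
    -- the first seed on the winning diagonal is the one B stored
    have hgm : db.get? m.1 = some (m.2.1, m.2.2) :=
      PySem.Dict.get?_of_mem_items db hmemm hnb
    have h2' := h2 m.1 m.2.1 m.2.2 hgm
    simp only [prioritize_seeds_by_diagonal, prioritize_seeds_by_diagonal_alt, ← hda, ← hdb]
    rw [hAc, hBc]
    by_cases hone : m.2.1 = 1
    · simp [hone]
    · have hcond : (m.2.1 == 1) = false := by simp [hone]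
      simp only [hcond, Bool.false_eq_true, if_false]
      rw [hAk, hBf]
      dsimp only
      cases hflt : seeds.filter (fun s => s.2 - s.1 == m.1) with
      | nil => rw [hflt] at h2'; simp at h2'
      | cons x t =>
        rw [hflt] at h2'
        simp only [List.head?_cons, Option.some.injEq] at h2'
        simp [PySem.List.pyGet?, PySem.List.pyIdx?, h2']
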